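-- pv_equiv track=rewrite | github.com/birc-gsa/bwt-python | src/bwt.py | ctable
-- ===== SOURCE A (Python) =====
-- from collections import Counter
--
-- def ctable(z: list[int]) -> list[int]:
--     """
--     Compute the C table for a mapped string.
--
--     >>> ctable([1, 2, 1, 0])
--     [0, 1, 3]
--     """
--     sigma = max(z) + 1
--     counts = Counter(z)
--     ctab = [0] * sigma
--     acc = 0
--     for i, _ in enumerate(ctab):
--         ctab[i] = acc
--         acc += counts[i]
--     return ctab
-- ===== SOURCE B (Python) =====
-- def ctable(z: list[int]) -> list[int]:
--     """Compute the C table directly from its definition: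
--     ctab[i] = number of elements of z lying in [0, i)."""
--     sigma = max(z) + 1
--     return [sum(1 for x in z if 0 <= x < i) for i in range(sigma)]
-- ===== Notes on version B (the rewrite author's own statement) =====
-- stated objective: simpler
-- what changed: Replaces the Counter + prefix-sum accumulator loop by a direct one-line definition: entry i is the number of elements of z in [0, i), computed by a fresh scan of z per entry.
-- outside the precondition, e.g. on ctable([]): A raises ValueError, B raises ValueError
import Mathlib
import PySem

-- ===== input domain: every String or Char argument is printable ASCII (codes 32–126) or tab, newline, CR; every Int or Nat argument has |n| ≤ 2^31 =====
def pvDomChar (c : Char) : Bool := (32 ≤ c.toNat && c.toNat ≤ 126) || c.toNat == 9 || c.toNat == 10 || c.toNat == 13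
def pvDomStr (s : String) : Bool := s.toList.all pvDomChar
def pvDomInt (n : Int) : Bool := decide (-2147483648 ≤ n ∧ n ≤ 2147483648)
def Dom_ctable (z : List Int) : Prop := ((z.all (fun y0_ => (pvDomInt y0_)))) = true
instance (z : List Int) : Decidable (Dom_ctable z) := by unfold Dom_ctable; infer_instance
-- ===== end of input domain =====

-- B replaces A's Counter + prefix-sum accumulator loop by the direct definition
-- (entry i counts the elements of z in [0, i)); objective: simpler.

-- ===== PORT A =====
-- Counter(z), then ctab[i] = acc; acc += counts[i] over i in range(sigma);
-- the fold state is (ctab-so-far, acc).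
def ctable (z : List Int) : List Int :=
  match PySem.List.max? z id with
  | none => []          -- Python raises ValueError here; excluded by Pre_ctable
  | some m =>
    let sigma : Int := m + 1
    let counts : PySem.Dict Int Int := PySem.Dict.counter z
    ((PySem.List.pyRange 0 sigma 1).foldl
      (fun (st : List Int × Int) i => (st.1 ++ [st.2], st.2 + counts.getD i 0))
      ([], 0)).1

-- ===== PORT B =====
-- [sum(1 for x in z if 0 <= x < i) for i in range(max(z) + 1)]
def ctable_alt (z : List Int) : List Int :=
  match PySem.List.max? z id with
  | none => []          -- Python raises ValueError here; excluded by Pre_ctable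
  | some m =>
    (PySem.List.pyRange 0 (m + 1) 1).map
      (fun i => ((z.countP (fun x => decide (0 ≤ x) && decide (x < i))) : Int))

-- ===== PRECONDITION & SPEC =====
-- Both programs raise ValueError (max of empty sequence) on the empty list; Pre_ excludes it.
def Pre_ctable (z : List Int) : Prop := z ≠ []
instance (z : List Int) : Decidable (Pre_ctable z) := by unfold Pre_ctable; infer_instance
def pvWitness_ctable : List Int := [1, 2, 1, 0]

def Spec_ctable (z : List Int) (out : List Int) : Prop := out = ctable_alt z
instance (z : List Int) (out : List Int) : Decidable (Spec_ctable z out) := by unfold Spec_ctable; infer_instance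

-- ===== CLAIM (what is proved, stated in full; the proofs are below) =====
def Claim_equal_ctable : Prop := ∀ (z : List Int), Dom_ctable z → Pre_ctable z → Spec_ctable z (ctable z)

-- ===== LEMMAS AND PROOFS =====

-- Splitting the count of [a, i) at its left end.
lemma countP_split (z : List Int) (a i : Int) (h : a < i) :
    (z.countP (fun x => decide (a ≤ x) && decide (x < i)))
      = z.count a + z.countP (fun x => decide (a + 1 ≤ x) && decide (x < i)) := by
  induction z with
  | nil => simp
  | cons x t ih =>
    simp only [List.countP_cons, List.count_cons, ih]
    split_ifs with h1 h2 h3 <;>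
      simp only [Bool.and_eq_true, decide_eq_true_eq, beq_iff_eq] at * <;> omega

-- A's accumulator loop produces, entry by entry, the count of z in [a, i).
lemma loop_eq (z : List Int) : ∀ (n : Nat) (a b : Int), (b - a).toNat = n →
    ∀ (out : List Int) (acc : Int),
    ((PySem.List.pyRange a b 1).foldl
        (fun (st : List Int × Int) i =>
          (st.1 ++ [st.2], st.2 + (PySem.Dict.counter z).getD i 0))
        (out, acc)).1
      = out ++ (PySem.List.pyRange a b 1).map
          (fun i => acc + ((z.countP (fun x => decide (a ≤ x) && decide (x < i))) : Int)) := by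
  intro n
  induction n with
  | zero =>
    intro a b hn out acc
    rw [PySem.List.pyRange_one_eq_nil (by omega)]
    simp
  | succ k ih =>
    intro a b hn out acc
    have hab : a < b := by omega
    rw [PySem.List.pyRange_one_cons hab]
    simp only [List.foldl_cons, List.map_cons]
    rw [ih (a + 1) b (by omega) (out ++ [acc]) (acc + (PySem.Dict.counter z).getD a 0)]
    rw [List.append_assoc]
    congr 1
    simp only [List.singleton_append, List.cons.injEq]
    constructor
    · have : (z.countP (fun x => decide (a ≤ x) && decide (x < a))) = 0 := by
        rw [List.countP_eq_zero]
        intro x _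
        simp only [Bool.and_eq_true, decide_eq_true_eq, not_and]
        omega
      simp [this]
    · apply List.map_congr_left
      intro i hi
      have hai : a + 1 ≤ i := (PySem.List.mem_pyRange_one.mp hi).1
      rw [PySem.Dict.getD_counter, countP_split z a i (by omega)]
      push_cast
      ring

-- ===== VERDICT (by name: the statement is the Claim_ definition above) =====
theorem ctable_spec : Claim_equal_ctable := by
  intro z _ _
  unfold Spec_ctable ctable ctable_alt
  cases hm : PySem.List.max? z id with
  | none => rfl
  | some m =>
    simp only
    rw [loop_eq z (m + 1 - 0).toNat 0 (m + 1) rfl [] 0]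
    simp
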